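-- pv_equiv track=rewrite | github.com/esmppp/101L_002L | Assignments/Assignment 9/Assignment 9.py | create_reported_month_dict
-- ===== SOURCE A (Python) =====
-- def create_reported_month_dict(list):
--     dict2 = {}
--     for i in list:
--         if i[1][:2] in dict2:
--             dict2[i[1][:2]] = dict2[i[1][:2]] +1
--         else:
--             dict2[i[1][:2]] = 1
--     return dict2
-- ===== SOURCE B (Python) =====
-- def create_reported_month_dict(list):
--     keys = [i[1][:2] for i in list]
--     return {k: keys.count(k) for k in dict.fromkeys(keys)}
-- ===== Notes on version B (the rewrite author's own statement) =====
-- stated objective: alternative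
-- what changed: B extracts all month prefixes once, deduplicates them in first-occurrence order, and builds the dict in one comprehension with keys.count(k) per distinct key, instead of A's incremental membership-test-and-increment loop.
import Mathlib
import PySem

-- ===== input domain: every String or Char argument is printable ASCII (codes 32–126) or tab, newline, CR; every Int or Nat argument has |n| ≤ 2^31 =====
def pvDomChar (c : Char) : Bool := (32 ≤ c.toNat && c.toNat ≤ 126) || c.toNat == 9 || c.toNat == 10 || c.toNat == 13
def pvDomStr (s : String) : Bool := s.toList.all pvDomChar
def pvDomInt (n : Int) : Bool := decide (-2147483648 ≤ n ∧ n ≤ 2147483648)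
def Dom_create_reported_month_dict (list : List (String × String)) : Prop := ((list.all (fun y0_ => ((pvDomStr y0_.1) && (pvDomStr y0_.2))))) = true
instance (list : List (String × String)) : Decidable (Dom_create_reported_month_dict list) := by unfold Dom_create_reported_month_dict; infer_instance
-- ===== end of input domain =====

-- B builds the same month-prefix count dict via extract-prefixes / dedup / count-per-distinct-key instead of A's incremental loop (objective: alternative).


-- ===== PORT A =====
def create_reported_month_dict (list : List (String × String)) : List (String × Int) :=
  (list.foldl (fun d i =>
      let k := PySem.Str.slice i.2 none (some 2)
      if d.contains k then d.insert k (d.getD k 0 + 1) else d.insert k 1)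
    PySem.Dict.empty).items

-- ===== PORT B =====
-- the comprehension iterates dict.fromkeys(keys) = PySem.List.dedup keys, whose elements are
-- distinct, so the resulting dict's items are exactly these pairs in this order
def create_reported_month_dict_alt (list : List (String × String)) : List (String × Int) :=
  let keys := list.map (fun i => PySem.Str.slice i.2 none (some 2))
  (PySem.List.dedup keys).map (fun k => (k, (keys.count k : Int)))

-- ===== PRECONDITION & SPEC =====
def Spec_create_reported_month_dict (list : List (String × String)) (out : List (String × Int)) : Prop := out = create_reported_month_dict_alt list
instance (list : List (String × String)) (out : List (String × Int)) : Decidable (Spec_create_reported_month_dict list out) := by unfold Spec_create_reported_month_dict; infer_instance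

-- ===== CLAIM (what is proved, stated in full; the proofs are below) =====
def Claim_equal_create_reported_month_dict : Prop := ∀ (list : List (String × String)), Dom_create_reported_month_dict list → Spec_create_reported_month_dict list (create_reported_month_dict list)

-- ===== LEMMAS AND PROOFS =====
-- A's loop body is 'insert k (getD k 0 + 1)' in both branches (getD is 0 when the key is absent)
theorem pv_step_eq (d : PySem.Dict String Int) (k : String) :
    (if d.contains k then d.insert k (d.getD k 0 + 1) else d.insert k 1)
      = d.insert k (d.getD k 0 + 1) := by
  by_cases h : d.contains k
  · simp [h]
  · rw [PySem.Dict.getD_of_not_contains d 0 (Bool.of_not_eq_true h)]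
    simp [h]

-- A's fold over the pairs equals the canonical counting fold over the extracted prefixes
theorem pv_fold_eq (l : List (String × String)) (d : PySem.Dict String Int) :
    l.foldl (fun d i =>
        let k := PySem.Str.slice i.2 none (some 2)
        if d.contains k then d.insert k (d.getD k 0 + 1) else d.insert k 1) d
      = (l.map (fun i => PySem.Str.slice i.2 none (some 2))).foldl
          (fun d k => d.insert k (d.getD k 0 + 1)) d := by
  simp only [pv_step_eq]
  exact (@List.foldl_map _ _ _ (fun i : String × String => PySem.Str.slice i.2 none (some 2)) (fun d k => d.insert k (d.getD k 0 + 1)) l d).symm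

-- ===== VERDICT (by name: the statement is the Claim_ definition above) =====
theorem create_reported_month_dict_spec : Claim_equal_create_reported_month_dict := by
  intro l _
  unfold Spec_create_reported_month_dict create_reported_month_dict create_reported_month_dict_alt
  rw [pv_fold_eq]
  simp only [PySem.Dict.foldl_insert_getD_add_one_eq_counter,
    PySem.Dict.items_counter, PySem.List.dedup_eq_ofList]
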